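-- pv_equiv track=rewrite | github.com/gpeters1/AoC2020 | Day9/day09a.py | numbers_add_up
-- ===== SOURCE A (Python) =====
-- def numbers_add_up(useable_numbers, data, index_of_total):
--     for i in useable_numbers:
--         for j in useable_numbers:
--             if i == j:
--                 continue
--             if data[index_of_total] - i - j == 0:
--                 useable_numbers.pop(0)
--                 useable_numbers.append(data[index_of_total])
--                 index_of_total += 1
--                 return numbers_add_up(useable_numbers, data, index_of_total)
--     return data[index_of_total]
-- ===== SOURCE B (Python) =====
-- def numbers_add_up(useable_numbers, data, index_of_total):
--     # Sliding window with a value-count dict: the O(k^2) pair scan becomes an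
--     # O(k) scan with O(1) lookups; the window is a list with a moving head
--     # instead of repeated pop(0). Return value only: does not mutate arguments.
--     counts = {}
--     for v in useable_numbers:
--         counts[v] = counts.get(v, 0) + 1
--     window = list(useable_numbers)
--     head = 0
--     while True:
--         target = data[index_of_total]
--         if not any(c > 0 and counts.get(target - v, 0) > 0 and target - v != v
--                    for v, c in counts.items()):
--             return target
--         out = window[head]
--         head += 1
--         counts[out] = counts.get(out, 0) - 1
--         window.append(target)
--         counts[target] = counts.get(target, 0) + 1
--         index_of_total += 1
-- ===== Notes on version B (the rewrite author's own statement) =====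
-- stated objective: faster
-- what changed: Replaces A's recursive slide with nested O(k^2) pair scans and pop(0) by an iterative sliding window kept as a list with a moving head plus a value-count dict, so each window is checked by one O(k) scan with O(1) lookups.
import Mathlib
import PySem

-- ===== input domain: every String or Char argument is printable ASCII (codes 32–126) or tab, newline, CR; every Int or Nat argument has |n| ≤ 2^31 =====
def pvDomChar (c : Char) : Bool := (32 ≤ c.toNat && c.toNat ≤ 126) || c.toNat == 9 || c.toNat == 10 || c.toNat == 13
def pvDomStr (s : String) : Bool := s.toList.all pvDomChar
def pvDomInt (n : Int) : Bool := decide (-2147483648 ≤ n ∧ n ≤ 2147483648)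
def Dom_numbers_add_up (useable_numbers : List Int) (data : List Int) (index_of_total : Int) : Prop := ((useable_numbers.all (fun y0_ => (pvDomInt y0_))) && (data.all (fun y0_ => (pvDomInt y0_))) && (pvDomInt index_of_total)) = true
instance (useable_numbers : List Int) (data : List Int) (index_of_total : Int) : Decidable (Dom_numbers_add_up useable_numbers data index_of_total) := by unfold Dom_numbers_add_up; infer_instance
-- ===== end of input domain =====

-- B replaces A's recursive slide with nested O(k^2) pair scans and pop(0) by an iterative
-- window (list + moving head) with a value-count dict: one O(k) scan per window (faster).
-- A mutates useable_numbers in place (pop/append); the equivalence proved is about the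
-- RETURN value only — B does not mutate its arguments.

-- ===== PORT A =====
-- Transliteration of A: the nested 'for i … for j …' with 'continue' on i == j is the
-- nested any; 'useable_numbers.pop(0); append(data[index]); return numbers_add_up(…)' is
-- the recursive call on (drop 1 ++ [target]); data[index] is pyGet? (none = IndexError,
-- outside Pre_, where the port returns 0).
def numbers_add_up (useable_numbers : List Int) (data : List Int) (index_of_total : Int) : Int :=
  match h : PySem.List.pyGet? data index_of_total with
  | none => 0
  | some target =>
    if useable_numbers.any (fun i => useable_numbers.any (fun j =>
        !(i == j) && (target - i - j == 0))) then
      numbers_add_up (useable_numbers.drop 1 ++ [target]) data (index_of_total + 1)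
    else target
termination_by (data.length - index_of_total).toNat
decreasing_by
  have hin : PySem.Raise.InRange data.length index_of_total := by
    by_contra hc
    rw [← PySem.List.pyGet?_eq_none_iff] at hc
    rw [h] at hc
    simp at hc
  have := hin.2
  omega

-- ===== PORT B =====
-- counts.items() scan: 'any(c > 0 and counts.get(target - v, 0) > 0 and target - v != v …)'
def pvHasPair (counts : PySem.Dict Int Int) (target : Int) : Bool :=
  counts.items.any (fun p =>
    (0 < p.2 : Bool) && (0 < counts.getD (target - p.1) 0 : Bool) && !(target - p.1 == p.1))

-- the 'while True' loop of B: window list + moving head + count dict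
def pvLoop (data : List Int) (counts : PySem.Dict Int Int) (window : List Int)
    (head : Nat) (index_of_total : Int) : Int :=
  match h : PySem.List.pyGet? data index_of_total with
  | none => 0
  | some target =>
    if pvHasPair counts target then
      let out := window.getD head 0
      pvLoop data
        (((counts.insert out (counts.getD out 0 - 1)).insert target
          ((counts.insert out (counts.getD out 0 - 1)).getD target 0 + 1)))
        (window ++ [target]) (head + 1) (index_of_total + 1)
    else target
termination_by (data.length - index_of_total).toNat
decreasing_by
  have hin : PySem.Raise.InRange data.length index_of_total := by
    by_contra hc
    rw [← PySem.List.pyGet?_eq_none_iff] at hc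
    rw [h] at hc
    simp at hc
  have := hin.2
  omega

def numbers_add_up_alt (useable_numbers : List Int) (data : List Int) (index_of_total : Int) : Int :=
  pvLoop data
    (useable_numbers.foldl (fun d v => d.insert v (d.getD v 0 + 1)) PySem.Dict.empty)
    useable_numbers 0 index_of_total

-- ===== PRECONDITION & SPEC =====
-- the window A scans after t slides, and the target it compares against
def pvWindowAt (useable_numbers data : List Int) (index_of_total : Int) (t : Nat) : List Int :=
  (useable_numbers ++ (List.range t).map (fun s => PySem.List.pyGetD data (index_of_total + s) 0)).drop t

-- Pre_ = exactly the inputs on which the Python A returns normally: the start index is not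
-- below -len(data) (IndexError at once) and some window reached before the index runs off
-- the end of data has no two distinct values summing to its target.
def Pre_numbers_add_up (useable_numbers : List Int) (data : List Int) (index_of_total : Int) : Prop :=
  -(data.length : Int) ≤ index_of_total ∧
  ∃ t < ((data.length : Int) - index_of_total).toNat,
    ¬ ∃ i ∈ pvWindowAt useable_numbers data index_of_total t,
      ∃ j ∈ pvWindowAt useable_numbers data index_of_total t,
        i ≠ j ∧ PySem.List.pyGetD data (index_of_total + t) 0 - i - j = 0
instance (useable_numbers : List Int) (data : List Int) (index_of_total : Int) : Decidable (Pre_numbers_add_up useable_numbers data index_of_total) := by unfold Pre_numbers_add_up; infer_instance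

def pvWitness_numbers_add_up : List Int × List Int × Int := ([1, 2], [3, 7], 0)

def Spec_numbers_add_up (useable_numbers : List Int) (data : List Int) (index_of_total : Int) (out : Int) : Prop := out = numbers_add_up_alt useable_numbers data index_of_total
instance (useable_numbers : List Int) (data : List Int) (index_of_total : Int) (out : Int) : Decidable (Spec_numbers_add_up useable_numbers data index_of_total out) := by unfold Spec_numbers_add_up; infer_instance

-- ===== CLAIM (what is proved, stated in full; the proofs are below) =====
def Claim_equal_numbers_add_up : Prop := ∀ (useable_numbers : List Int) (data : List Int) (index_of_total : Int), Dom_numbers_add_up useable_numbers data index_of_total → Pre_numbers_add_up useable_numbers data index_of_total → Spec_numbers_add_up useable_numbers data index_of_total (numbers_add_up useable_numbers data index_of_total)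

-- ===== LEMMAS AND PROOFS =====

-- one-step unfolding equations for the two recursions (the 'match h :' discriminant
-- is named for the termination proof, so we unfold by cases)
lemma numbers_add_up_none (u data : List Int) (idx : Int)
    (h : PySem.List.pyGet? data idx = none) : numbers_add_up u data idx = 0 := by
  rw [numbers_add_up]
  split <;> simp_all

lemma numbers_add_up_some (u data : List Int) (idx target : Int)
    (h : PySem.List.pyGet? data idx = some target) :
    numbers_add_up u data idx
      = if u.any (fun i => u.any (fun j => !(i == j) && (target - i - j == 0))) then
          numbers_add_up (u.drop 1 ++ [target]) data (idx + 1)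
        else target := by
  rw [numbers_add_up]
  split <;> simp_all

lemma pvLoop_none (data : List Int) (counts : PySem.Dict Int Int) (window : List Int)
    (head : Nat) (idx : Int) (h : PySem.List.pyGet? data idx = none) :
    pvLoop data counts window head idx = 0 := by
  rw [pvLoop]
  split <;> simp_all

lemma pvLoop_some (data : List Int) (counts : PySem.Dict Int Int) (window : List Int)
    (head : Nat) (idx target : Int) (h : PySem.List.pyGet? data idx = some target) :
    pvLoop data counts window head idx
      = if pvHasPair counts target then
          pvLoop data
            (((counts.insert (window.getD head 0) (counts.getD (window.getD head 0) 0 - 1)).insert target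
              ((counts.insert (window.getD head 0) (counts.getD (window.getD head 0) 0 - 1)).getD target 0 + 1)))
            (window ++ [target]) (head + 1) (idx + 1)
        else target := by
  rw [pvLoop]
  split <;> simp_all

-- the invariant linking B's loop state to A's current window W
def pvInv (counts : PySem.Dict Int Int) (W : List Int) : Prop :=
  (∀ x : Int, counts.getD x 0 = W.count x) ∧ counts.keys.Nodup ∧
  (∀ x : Int, 0 < W.count x → x ∈ counts.keys)

-- under the invariant, B's O(k) dict scan decides exactly A's nested pair scan
lemma pvHasPair_eq (counts : PySem.Dict Int Int) (W : List Int) (target : Int)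
    (hinv : pvInv counts W) :
    pvHasPair counts target
      = W.any (fun i => W.any (fun j => !(i == j) && (target - i - j == 0))) := by
  obtain ⟨h1, h2, h3⟩ := hinv
  rw [Bool.eq_iff_iff]
  simp only [pvHasPair, List.any_eq_true, Bool.and_eq_true, decide_eq_true_eq,
    Bool.not_eq_true', beq_eq_false_iff_ne, beq_iff_eq]
  constructor
  · rintro ⟨⟨v, c⟩, hmem, ⟨⟨hc, hg⟩, hne⟩⟩
    have hc' : (0 : Int) < c := hc
    have hg' : 0 < counts.getD (target - v) 0 := hg
    have hne' : target - v ≠ v := hne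
    have hcv : counts.getD v 0 = c := PySem.Dict.getD_of_mem_items counts hmem h2 0
    have h1v := h1 v
    have h1g := h1 (target - v)
    refine ⟨v, ?_, target - v, ?_, fun h => hne' h.symm, by ring⟩
    · exact List.count_pos_iff.mp (by omega)
    · exact List.count_pos_iff.mp (by omega)
  · rintro ⟨i, hiW, j, hjW, hne, hsum⟩
    have hiK : i ∈ counts.keys := h3 i (List.count_pos_iff.mpr hiW)
    obtain ⟨c2, hmem2⟩ : ∃ x, (i, x) ∈ counts.items := by
      simpa [PySem.Dict.keys] using hiK
    have hcv : counts.getD i 0 = c2 := PySem.Dict.getD_of_mem_items counts hmem2 h2 0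
    have h1i := h1 i
    have h1j := h1 (target - i)
    have hcnti : 0 < List.count i W := List.count_pos_iff.mpr hiW
    have hcntj : 0 < List.count (target - i) W := by
      have hji : target - i = j := by omega
      rw [hji]
      exact List.count_pos_iff.mpr hjW
    refine ⟨(i, c2), hmem2, ⟨⟨?_, ?_⟩, ?_⟩⟩
    · show (0 : Int) < c2
      omega
    · show 0 < counts.getD (target - i) 0
      omega
    · show target - i ≠ i
      intro hji2
      apply hne
      omega

lemma pvInv_step (counts : PySem.Dict Int Int) (out target : Int) (rest : List Int)
    (hinv : pvInv counts (out :: rest)) :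
    pvInv ((counts.insert out (counts.getD out 0 - 1)).insert target
      ((counts.insert out (counts.getD out 0 - 1)).getD target 0 + 1)) (rest ++ [target]) := by
  obtain ⟨h1, h2, h3⟩ := hinv
  refine ⟨?_, ?_, ?_⟩
  · intro x
    rw [PySem.Dict.getD_insert, PySem.Dict.getD_insert, PySem.Dict.getD_insert]
    have hcx := h1 x
    have hct := h1 target
    have hco := h1 out
    simp only [List.count_cons, List.count_append, List.count_nil] at *
    by_cases hxt : x = target <;> by_cases hxo : x = out <;>
      by_cases hto : target = out <;> simp_all <;> omega
  · exact PySem.Dict.nodup_keys_insert _ _ _ (PySem.Dict.nodup_keys_insert _ _ _ h2)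
  · intro x hx
    rw [PySem.Dict.mem_keys_insert, PySem.Dict.mem_keys_insert]
    by_cases hxt : x = target
    · exact Or.inl hxt
    · right
      by_cases hxo : x = out
      · exact Or.inl hxo
      · right
        apply h3
        simp only [List.count_append, List.count_cons,
          List.count_nil, beq_iff_eq] at hx ⊢
        rw [if_neg (fun h => hxt h.symm)] at hx
        rw [if_neg (fun h => hxo h.symm)]
        omega

-- main loop correspondence: B's state (counts, window, head) represents A's list window.drop head
lemma pvLoop_eq (data : List Int) :
    ∀ (n : Nat) (idx : Int) (counts : PySem.Dict Int Int) (window : List Int) (head : Nat),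
      (data.length - idx).toNat ≤ n → head ≤ window.length →
      pvInv counts (window.drop head) →
      pvLoop data counts window head idx = numbers_add_up (window.drop head) data idx := by
  intro n
  induction n with
  | zero =>
    intro idx counts window head hn _ _
    have hnone : PySem.List.pyGet? data idx = none := by
      rw [PySem.List.pyGet?_eq_none_iff]
      intro hin
      have := hin.2
      omega
    rw [pvLoop_none data counts window head idx hnone,
      numbers_add_up_none (window.drop head) data idx hnone]
  | succ m ih =>
    intro idx counts window head hn hhead hinv
    cases h : PySem.List.pyGet? data idx with
    | none =>
      rw [pvLoop_none data counts window head idx h,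
        numbers_add_up_none (window.drop head) data idx h]
    | some target =>
      have hin : PySem.Raise.InRange data.length idx := by
        by_contra hc
        rw [← PySem.List.pyGet?_eq_none_iff] at hc
        rw [h] at hc
        simp at hc
      rw [pvLoop_some data counts window head idx target h,
        numbers_add_up_some (window.drop head) data idx target h,
        pvHasPair_eq counts (window.drop head) target hinv]
      by_cases hp : (window.drop head).any (fun i => (window.drop head).any (fun j =>
          !(i == j) && (target - i - j == 0))) = true
      · simp only [hp, if_true]
        -- the window is nonempty: a pair of distinct values exists in it
        have hne : window.drop head ≠ [] := by
          intro hnil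
          rw [hnil] at hp
          simp at hp
        have hlt : head < window.length := by
          by_contra hge
          exact hne (List.drop_eq_nil_of_le (by omega))
        have hWcons : window.drop head = window[head] :: window.drop (head + 1) :=
          List.drop_eq_getElem_cons hlt
        have hout : window.getD head 0 = window[head] := by
          simp [List.getD_eq_getElem?_getD, List.getElem?_eq_getElem hlt]
        have hdropped : (window ++ [target]).drop (head + 1)
            = window.drop (head + 1) ++ [target] :=
          List.drop_append_of_le_length (by omega)
        rw [ih (idx + 1) _ (window ++ [target]) (head + 1)
          (by have := hin.2; omega)
          (by simp; omega)
          (by rw [hdropped, hout]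
              exact pvInv_step counts window[head] target (window.drop (head + 1))
                (hWcons ▸ hinv))]
        rw [hdropped]
        have hdrop1 : (window.drop head).drop 1 = window.drop (head + 1) := by
          rw [hWcons]
          rfl
        rw [hdrop1]
      · simp only [Bool.not_eq_true] at hp
        rw [hp]
        simp

theorem pv_ports_agree (u data : List Int) (idx : Int) :
    numbers_add_up u data idx = numbers_add_up_alt u data idx := by
  unfold numbers_add_up_alt
  rw [PySem.Dict.foldl_insert_getD_add_one_eq_counter]
  rw [pvLoop_eq data (data.length - idx).toNat idx _ u 0 le_rfl (Nat.zero_le _) ?_]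
  · rw [List.drop_zero]
  · refine ⟨?_, PySem.Dict.nodup_keys_counter u, ?_⟩
    · intro x; exact PySem.Dict.getD_counter u x
    · intro x hx
      rw [PySem.Dict.keys_counter]
      exact (PySem.Set.mem_ofList u x).mpr (List.count_pos_iff.mp (by simpa using hx))

-- ===== VERDICT (by name: the statement is the Claim_ definition above) =====
theorem numbers_add_up_spec : Claim_equal_numbers_add_up := by
  intro u data idx _ _
  unfold Spec_numbers_add_up
  exact pv_ports_agree u data idx
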